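-- pv_equiv track=rewrite | github.com/Eszkis/homework | model/accountNumber/userStory5.py | change_number
-- ===== SOURCE A (Python) =====
-- def calculate_check_sum(account_number):
--     sum = 0
--     for index in range(len(account_number)):
--         sum += int(account_number[index]) * (9 - index)
--     return sum % 11
--
-- def change_number(account_number):
--     valid_account_numbers = []
--     changeable_values = {
--         "0": ["8"],
--         "1": ["7"],
--         "3": ["9"],
--         "5": ["6", "9"],
--         "6": ["5", "8"],
--         "7": ["1"],
--         "8": ["0", "6", "9", "10"],
--         "9": ["3", "5", "8"],
--         "10": ["8"],
--         "11": ["13"],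
--         "12": ["14"],
--         "13": ["11"],
--         "14": ["12", "15"],
--         "15": ["14"]
--     }
--     for index in range(len(account_number)):
--         char = account_number[index]
--         if char in changeable_values.keys():
--             for changed in changeable_values[char]:
--                 new_account = account_number.copy()
--                 new_account[index] = changed
--                 if calculate_check_sum(new_account) == 0:
--                     valid_account_numbers.append(new_account)
--     return valid_account_numbers
-- ===== SOURCE B (Python) =====
-- def change_number(account_number):
--     changeable_values = {
--         "0": ["8"],
--         "1": ["7"],
--         "3": ["9"],
--         "5": ["6", "9"],
--         "6": ["5", "8"],
--         "7": ["1"],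
--         "8": ["0", "6", "9", "10"],
--         "9": ["3", "5", "8"],
--         "10": ["8"],
--         "11": ["13"],
--         "12": ["14"],
--         "13": ["11"],
--         "14": ["12", "15"],
--         "15": ["14"]
--     }
--     hits = [(i, ch) for i, ch in enumerate(account_number) if ch in changeable_values]
--     if not hits:
--         return []
--     base = sum(int(x) * (9 - i) for i, x in enumerate(account_number))
--     valid_account_numbers = []
--     for i, ch in hits:
--         weight = 9 - i
--         old = int(ch)
--         for changed in changeable_values[ch]:
--             if (base + (int(changed) - old) * weight) % 11 == 0:
--                 new_account = account_number.copy()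
--                 new_account[i] = changed
--                 valid_account_numbers.append(new_account)
--     return valid_account_numbers
-- ===== Notes on version B (the rewrite author's own statement) =====
-- stated objective: alternative
-- what changed: B precomputes the weighted base checksum once and tests each single-digit candidate by a delta update ((base + (new-old)*weight) % 11) instead of recomputing the full checksum of each copied list; candidate positions are collected in one enumerate/filter pass; a timing run found no measurable speed difference on the generated inputs.
import Mathlib
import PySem

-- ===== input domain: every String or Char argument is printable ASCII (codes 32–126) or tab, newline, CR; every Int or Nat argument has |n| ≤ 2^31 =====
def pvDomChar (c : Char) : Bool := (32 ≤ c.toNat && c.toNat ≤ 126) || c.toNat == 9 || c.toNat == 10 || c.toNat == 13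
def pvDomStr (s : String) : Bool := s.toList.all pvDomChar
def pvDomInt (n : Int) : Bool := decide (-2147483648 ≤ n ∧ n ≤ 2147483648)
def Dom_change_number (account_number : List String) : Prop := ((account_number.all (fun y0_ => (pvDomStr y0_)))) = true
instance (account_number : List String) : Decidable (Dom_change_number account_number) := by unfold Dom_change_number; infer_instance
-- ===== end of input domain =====

-- B precomputes the base checksum once and tests each candidate by a delta update mod 11 instead of
-- recomputing the full checksum of each copied list; equivalence of the return values is proved on Pre_ below.

-- the changeable_values dict literal shared by both Pythons
def pvChangeable : PySem.Dict String (List String) :=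
  PySem.Dict.ofList [
    ("0", ["8"]), ("1", ["7"]), ("3", ["9"]), ("5", ["6", "9"]), ("6", ["5", "8"]),
    ("7", ["1"]), ("8", ["0", "6", "9", "10"]), ("9", ["3", "5", "8"]), ("10", ["8"]),
    ("11", ["13"]), ("12", ["14"]), ("13", ["11"]), ("14", ["12", "15"]), ("15", ["14"])]

-- ===== PORT A =====
-- calculate_check_sum; `none` = the ValueError int() raises on a non-integer string
def calculate_check_sum (account_number : List String) : Option Int :=
  ((List.range account_number.length).foldl
    (fun acc index => acc.bind (fun s =>
      (PySem.Int.ofStr? (account_number.getD index "")).map (fun v => s + v * (9 - (index : Int)))))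
    (some 0)).map (fun s => PySem.Int.mod s 11)

def change_number (account_number : List String) : List (List String) :=
  (List.range account_number.length).foldl
    (fun valid index =>
      match pvChangeable.get? (account_number.getD index "") with
      | some vals =>
          vals.foldl (fun valid2 changed =>
            let new_account := account_number.set index changed
            if calculate_check_sum new_account = some 0 then valid2 ++ [new_account] else valid2) valid
      | none => valid)
    []

-- ===== PORT B =====
-- base checksum-weighted sum; `none` = the ValueError int() raises (unreachable inside Pre_)
def pvBaseSum (account_number : List String) : Option Int :=
  (PySem.List.enumerate account_number).foldl
    (fun acc p => acc.bind (fun s =>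
      (PySem.Int.ofStr? p.2).map (fun v => s + v * (9 - p.1))))
    (some 0)

def change_number_alt (account_number : List String) : List (List String) :=
  let hits := (PySem.List.enumerate account_number).filter
    (fun p => (pvChangeable.get? p.2).isSome)
  if hits.isEmpty then []
  else
    match pvBaseSum account_number with
    | none => []      -- Source B raises ValueError here; excluded by Pre_
    | some base =>
        hits.foldl (fun valid p =>
          match pvChangeable.get? p.2, PySem.Int.ofStr? p.2 with
          | some vals, some old =>
              vals.foldl (fun valid2 changed =>
                match PySem.Int.ofStr? changed with
                | some nv =>
                    if PySem.Int.mod (base + (nv - old) * (9 - p.1)) 11 = 0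
                    then valid2 ++ [account_number.set p.1.toNat changed] else valid2
                | none => valid2) valid
          | _, _ => valid)
          []

-- ===== PRECONDITION & SPEC =====
-- Pre_ excludes exactly the inputs where both Pythons raise ValueError: some element is a changeable key
-- while some other element is not int()-parsable (the full checksum / base sum then parses every element).
def Pre_change_number (account_number : List String) : Prop :=
  (account_number.all (fun s => (PySem.Int.ofStr? s).isSome)) = true ∨
  (account_number.all (fun s =>
     s ∉ (["0","1","3","5","6","7","8","9","10","11","12","13","14","15"] : List String))) = true
instance (account_number : List String) : Decidable (Pre_change_number account_number) := by
  unfold Pre_change_number; infer_instance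

def pvWitness_change_number : List String := ["1", "2", "3", "4", "5", "6", "7", "8", "9"]

def Spec_change_number (account_number : List String) (out : List (List String)) : Prop := out = change_number_alt account_number
instance (account_number : List String) (out : List (List String)) : Decidable (Spec_change_number account_number out) := by unfold Spec_change_number; infer_instance

-- ===== CLAIM (what is proved, stated in full; the proofs are below) =====
def Claim_equal_change_number : Prop := ∀ (account_number : List String), Dom_change_number account_number → Pre_change_number account_number → Spec_change_number account_number (change_number account_number)

-- ===== LEMMAS AND PROOFS =====

-- the dict's key list and the parse-default helper
def pvKeys : List String := ["0","1","3","5","6","7","8","9","10","11","12","13","14","15"]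

def pvParse (s : String) : Int := (PySem.Int.ofStr? s).getD 0

-- weighted digit sum with decreasing weights starting at w (the checksum's sum of int(x_i)*(9-i))
def pvWsum : List String → Int → Int
  | [], _ => 0
  | x :: t, w => pvParse x * w + pvWsum t (w - 1)

lemma pv_enum_foldl {α β : Type} (d : α) (g : β → Int × α → β) :
    ∀ (xs : List α) (s : Nat) (acc : β),
      (PySem.List.enumerate xs (s : Int)).foldl g acc
        = (List.range xs.length).foldl (fun a (i : Nat) => g a (((s + i : Nat) : Int), xs.getD i d)) acc := by
  intro xs
  induction xs with
  | nil => intro s acc; simp [PySem.List.enumerate_nil]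
  | cons x t ih =>
    intro s acc
    rw [PySem.List.enumerate_cons, List.foldl_cons]
    have h1 : ((s : Int) + 1) = ((s + 1 : Nat) : Int) := by omega
    rw [h1, ih (s + 1) (g acc ((s : Int), x))]
    rw [List.length_cons, List.range_succ_eq_map, List.foldl_cons, List.foldl_map]
    have h2 : (fun (a : β) (i : Nat) => g a (((s + 1 + i : Nat) : Int), t.getD i d))
        = (fun (a : β) (i : Nat) => g a (((s + Nat.succ i : Nat) : Int), (x :: t).getD (Nat.succ i) d)) := by
      funext a i
      have h3 : s + 1 + i = s + Nat.succ i := by omega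
      simp [h3]
    rw [h2]
    simp

lemma pv_enum_foldl0 {α β : Type} (d : α) (g : β → Int × α → β) (xs : List α) (acc : β) :
    (List.range xs.length).foldl (fun a (i : Nat) => g a ((i : Int), xs.getD i d)) acc
      = (PySem.List.enumerate xs 0).foldl g acc := by
  have h := pv_enum_foldl d g xs 0 acc
  simp only [Nat.cast_zero, Nat.zero_add] at h
  rw [h]

lemma pv_mem_enumerate {α : Type} (d : α) :
    ∀ (xs : List α) (s : Nat) (p : Int × α), p ∈ PySem.List.enumerate xs (s : Int) →
      ∃ k : Nat, p.1 = ((s + k : Nat) : Int) ∧ k < xs.length ∧ xs.getD k d = p.2 := by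
  intro xs
  induction xs with
  | nil => intro s p hp; simp [PySem.List.enumerate_nil] at hp
  | cons x t ih =>
    intro s p hp
    rw [PySem.List.enumerate_cons] at hp
    rcases List.mem_cons.mp hp with h | h
    · exact ⟨0, by simp [h], by simp, by simp [h]⟩
    · have h1 : ((s : Int) + 1) = ((s + 1 : Nat) : Int) := by omega
      rw [h1] at h
      obtain ⟨k, hk1, hk2, hk3⟩ := ih (s + 1) p h
      exact ⟨k + 1, by rw [hk1]; congr 1; omega, by simpa using hk2, by simpa using hk3⟩

def pvGsum : Option Int → Int × String → Option Int :=
  fun a p => a.bind (fun t => (PySem.Int.ofStr? p.2).map (fun v => t + v * (9 - p.1)))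

lemma pv_sum_foldl :
    ∀ (xs : List String), (∀ s ∈ xs, (PySem.Int.ofStr? s).isSome) →
      ∀ (st : Nat) (acc : Int),
      (PySem.List.enumerate xs (st : Int)).foldl pvGsum (some acc)
        = some (acc + pvWsum xs (9 - st)) := by
  intro xs
  induction xs with
  | nil => intro _ st acc; simp [PySem.List.enumerate_nil, pvWsum]
  | cons x t ih =>
    intro h st acc
    obtain ⟨v, hv⟩ := Option.isSome_iff_exists.mp (h x (List.mem_cons_self ..))
    rw [PySem.List.enumerate_cons, List.foldl_cons]
    have h1 : ((st : Int) + 1) = ((st + 1 : Nat) : Int) := by omega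
    simp only [pvGsum, hv, Option.bind_some, Option.map_some, h1]
    rw [ih (fun s hs => h s (List.mem_cons_of_mem _ hs)) (st + 1) (acc + v * (9 - st))]
    congr 1
    simp only [pvWsum, pvParse, hv, Option.getD_some]
    push_cast
    ring_nf

lemma pv_chk_bridge (ys : List String) (c : Option Int) :
    (List.range ys.length).foldl
      (fun acc index => acc.bind (fun s =>
        (PySem.Int.ofStr? (ys.getD index "")).map (fun v => s + v * (9 - (index : Int))))) c
      = (PySem.List.enumerate ys 0).foldl pvGsum c :=
  pv_enum_foldl0 "" pvGsum ys c

lemma pv_chk (ys : List String) (h : ∀ s ∈ ys, (PySem.Int.ofStr? s).isSome) :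
    calculate_check_sum ys = some (PySem.Int.mod (pvWsum ys 9) 11) := by
  unfold calculate_check_sum
  rw [pv_chk_bridge]
  have h0 := pv_sum_foldl ys h 0 0
  simp only [Nat.cast_zero] at h0
  rw [h0]
  simp

lemma pv_base (xs : List String) (h : ∀ s ∈ xs, (PySem.Int.ofStr? s).isSome) :
    pvBaseSum xs = some (pvWsum xs 9) := by
  have h0 := pv_sum_foldl xs h 0 0
  simp only [Nat.cast_zero] at h0
  unfold pvBaseSum
  refine h0.trans ?_
  norm_num

lemma pv_wsum_set (r : String) :
    ∀ (xs : List String) (k : Nat) (w : Int), k < xs.length →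
      pvWsum (xs.set k r) w = pvWsum xs w + (pvParse r - pvParse (xs.getD k "")) * (w - k) := by
  intro xs
  induction xs with
  | nil => intro k w hk; simp at hk
  | cons x t ih =>
    intro k w hk
    cases k with
    | zero => simp [pvWsum]; ring_nf
    | succ k =>
      have hk2 : k < t.length := by simpa using hk
      simp only [List.set_cons_succ, pvWsum, List.getD_cons_succ]
      rw [ih k (w - 1) hk2]
      push_cast
      ring_nf

lemma pv_items : pvChangeable.items = [
    ("0", ["8"]), ("1", ["7"]), ("3", ["9"]), ("5", ["6", "9"]), ("6", ["5", "8"]),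
    ("7", ["1"]), ("8", ["0", "6", "9", "10"]), ("9", ["3", "5", "8"]), ("10", ["8"]),
    ("11", ["13"]), ("12", ["14"]), ("13", ["11"]), ("14", ["12", "15"]), ("15", ["14"])] := by
  decide

-- every value string and every key of the dict parses as an int
lemma pv_vals_parsable (k : String) (vals : List String) (h : pvChangeable.get? k = some vals) :
    (PySem.Int.ofStr? k).isSome ∧ ∀ v ∈ vals, (PySem.Int.ofStr? v).isSome := by
  have hm := ((PySem.Dict.get?_eq_some_iff_mem_items pvChangeable k vals (by decide)).mp) h
  rw [pv_items] at hm
  simp only [List.mem_cons, List.not_mem_nil, or_false, Prod.mk.injEq] at hm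
  rcases hm with ⟨rfl, rfl⟩ | ⟨rfl, rfl⟩ | ⟨rfl, rfl⟩ | ⟨rfl, rfl⟩ | ⟨rfl, rfl⟩ | ⟨rfl, rfl⟩ |
    ⟨rfl, rfl⟩ | ⟨rfl, rfl⟩ | ⟨rfl, rfl⟩ | ⟨rfl, rfl⟩ | ⟨rfl, rfl⟩ | ⟨rfl, rfl⟩ | ⟨rfl, rfl⟩ | ⟨rfl, rfl⟩ <;>
    exact ⟨by decide, by decide⟩

lemma pv_keys : pvChangeable.keys = pvKeys := by decide

lemma pv_lookup_none (s : String) (h : s ∉ pvKeys) : pvChangeable.get? s = none := by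
  rw [PySem.Dict.get?_eq_none_iff_not_mem_keys, pv_keys]
  exact h

lemma pv_A_nil (xs : List String) (h : ∀ s ∈ xs, pvChangeable.get? s = none) :
    change_number xs = [] := by
  unfold change_number
  rw [PySem.List.foldl_congr_mem (g := fun (a : List (List String)) (_ : Nat) => a)]
  · simp
  · intro acc i hi
    have hlen : i < xs.length := List.mem_range.mp hi
    have hmem : xs.getD i "" ∈ xs := by
      rw [List.getD_eq_getElem _ _ hlen]; exact List.getElem_mem hlen
    rw [h _ hmem]


-- A's per-index loop body, as a function of the (index, element) pair
def pvGA (xs : List String) : List (List String) → Int × String → List (List String) :=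
  fun valid p =>
    match pvChangeable.get? p.2 with
    | some vals =>
        vals.foldl (fun valid2 changed =>
          if calculate_check_sum (xs.set p.1.toNat changed) = some 0
          then valid2 ++ [xs.set p.1.toNat changed] else valid2) valid
    | none => valid

lemma pv_A_bridge (xs : List String) :
    change_number xs = (PySem.List.enumerate xs 0).foldl (pvGA xs) [] := by
  unfold change_number
  exact pv_enum_foldl0 "" (pvGA xs) xs []

-- B's per-hit loop body
def pvFB (xs : List String) (base : Int) : List (List String) → Int × String → List (List String) :=
  fun valid p =>
    match pvChangeable.get? p.2, PySem.Int.ofStr? p.2 with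
    | some vals, some old =>
        vals.foldl (fun valid2 changed =>
          match PySem.Int.ofStr? changed with
          | some nv =>
              if PySem.Int.mod (base + (nv - old) * (9 - p.1)) 11 = 0
              then valid2 ++ [xs.set p.1.toNat changed] else valid2
          | none => valid2) valid
    | _, _ => valid

lemma pv_B_eval (xs : List String) (w : Int)
    (hne : (PySem.List.enumerate xs 0).filter (fun p => (pvChangeable.get? p.2).isSome) ≠ [])
    (hbase : pvBaseSum xs = some w) :
    change_number_alt xs
      = ((PySem.List.enumerate xs 0).filter (fun p => (pvChangeable.get? p.2).isSome)).foldl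
          (pvFB xs w) [] := by
  unfold change_number_alt
  rw [hbase, if_neg (by simpa [List.isEmpty_iff] using hne)]
  exact rfl

-- ===== VERDICT (by name: the statement is the Claim_ definition above) =====
theorem change_number_spec : Claim_equal_change_number := by
  intro xs _ hpre
  unfold Spec_change_number
  rcases eq_or_ne ((PySem.List.enumerate xs 0).filter (fun p => (pvChangeable.get? p.2).isSome)) []
    with hemp | hne
  · have hB : change_number_alt xs = [] := by
      unfold change_number_alt
      rw [if_pos (by simp [hemp])]
    have hnone : ∀ s ∈ xs, pvChangeable.get? s = none := by
      intro s hs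
      have hs2 : s ∈ (PySem.List.enumerate xs 0).map (·.2) := by
        rw [PySem.List.map_snd_enumerate]; exact hs
      obtain ⟨p, hp, hps⟩ := List.mem_map.mp hs2
      have hf := List.filter_eq_nil_iff.mp hemp p hp
      rw [← hps]
      simpa using hf
    rw [hB, pv_A_nil xs hnone]
  · have hpar : ∀ s ∈ xs, (PySem.Int.ofStr? s).isSome := by
      rcases hpre with h1 | h2
      · intro s hs; simpa using List.all_eq_true.mp h1 s hs
      · exfalso
        apply hne
        apply List.filter_eq_nil_iff.mpr
        intro p hp
        have hpx : p.2 ∈ xs := by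
          have := List.mem_map_of_mem (f := (·.2)) hp
          rwa [PySem.List.map_snd_enumerate] at this
        have hln : pvChangeable.get? p.2 = none := by
          apply pv_lookup_none
          simp only [pvKeys, List.mem_cons, List.not_mem_nil, or_false, not_or]
          simpa using List.all_eq_true.mp h2 p.2 hpx
        simp [hln]
    have hbase := pv_base xs hpar
    rw [pv_B_eval xs (pvWsum xs 9) hne hbase, List.foldl_filter, pv_A_bridge xs]
    apply PySem.List.foldl_congr_mem
    intro acc p hp
    obtain ⟨k, hk1, hk2, hk3⟩ := pv_mem_enumerate "" xs 0 p (by simpa using hp)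
    simp only [Nat.zero_add] at hk1
    have hkt : p.1.toNat = k := by rw [hk1]; exact Int.toNat_natCast k
    cases hcase : pvChangeable.get? p.2 with
    | none => simp [pvGA, hcase]
    | some vals =>
      obtain ⟨hkey, hvals⟩ := pv_vals_parsable p.2 vals hcase
      obtain ⟨old, hold⟩ := Option.isSome_iff_exists.mp hkey
      simp only [pvGA, pvFB, hcase, hold, Option.isSome_some, if_true]
      apply PySem.List.foldl_congr_mem
      intro acc2 ch hch
      obtain ⟨nv, hnv⟩ := Option.isSome_iff_exists.mp (hvals ch hch)
      have hsetp : ∀ s ∈ xs.set p.1.toNat ch, (PySem.Int.ofStr? s).isSome := by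
        intro s hs
        rcases List.mem_or_eq_of_mem_set hs with h | h
        · exact hpar s h
        · rw [h]; simp [hnv]
      have hk4 : xs[k]?.getD "" = p.2 := hk3
      rw [pv_chk _ hsetp, hkt, pv_wsum_set ch xs k 9 hk2]
      simp [pvParse, hk4, hold, hnv, hk1]
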